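-- pv_equiv track=rewrite | github.com/zackeua/AdventOfCode | 2023/dag7/7_1.py | hand_to_num
-- ===== SOURCE A (Python) =====
-- def hand_to_num(hand):
--     total = 0
--     for val in hand:
--         total *= 15
--         if val == 'A':
--             total += 14
--         elif val == 'K':
--             total += 13
--         elif val == 'Q':
--             total += 12
--         elif val == 'J':
--             total += 11
--         elif val == 'T':
--             total += 10
--         else:
--             total += int(val)
--     return total
-- ===== SOURCE B (Python) =====
-- def hand_to_num(hand):
--     values = {'A': 14, 'K': 13, 'Q': 12, 'J': 11, 'T': 10}
--     total = 0
--     weight = 1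
--     for c in reversed(hand):
--         total += (values[c] if c in values else int(c)) * weight
--         weight *= 15
--     return total
-- ===== Notes on version B (the rewrite author's own statement) =====
-- stated objective: alternative
-- what changed: Replaces the left-to-right Horner accumulation (total = total*15 + value) and the if/elif value chain by a right-to-left positional power sum with an explicit running weight and a dict lookup for the face-card values.
import Mathlib
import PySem

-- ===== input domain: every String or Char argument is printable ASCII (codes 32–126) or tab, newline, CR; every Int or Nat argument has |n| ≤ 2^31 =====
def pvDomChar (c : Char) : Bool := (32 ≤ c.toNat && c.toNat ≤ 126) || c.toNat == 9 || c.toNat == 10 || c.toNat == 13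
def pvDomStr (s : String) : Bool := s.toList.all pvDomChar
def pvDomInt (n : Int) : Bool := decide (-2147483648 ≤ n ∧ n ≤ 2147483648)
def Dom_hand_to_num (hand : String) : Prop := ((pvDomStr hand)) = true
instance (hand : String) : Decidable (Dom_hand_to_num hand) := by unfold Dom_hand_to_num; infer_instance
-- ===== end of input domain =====

-- B replaces A's left-to-right Horner accumulation and if/elif chain by a
-- right-to-left positional sum with a running weight and a dict lookup (same values).

-- ===== PORT A =====
-- A's per-character step: the if/elif chain; int(val) via PySem.Int.ofChars?
-- (getD 0 is never reached inside Pre_hand_to_num, where int(val) succeeds).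
def handStepA (total : Int) (val : Char) : Int :=
  let total := total * 15
  if val = 'A' then total + 14
  else if val = 'K' then total + 13
  else if val = 'Q' then total + 12
  else if val = 'J' then total + 11
  else if val = 'T' then total + 10
  else total + (PySem.Int.ofChars? [val]).getD 0

def hand_to_num (hand : String) : Int :=
  hand.toList.foldl handStepA 0

-- ===== PORT B =====
-- B's card values dict and per-character value lookup with int(c) fallback
-- (getD 0 never reached inside Pre_hand_to_num).
def handValuesB : PySem.Dict Char Int :=
  PySem.Dict.ofList [('A', 14), ('K', 13), ('Q', 12), ('J', 11), ('T', 10)]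

def handValB (c : Char) : Int :=
  match handValuesB.get? c with
  | some v => v
  | none => (PySem.Int.ofChars? [c]).getD 0

def hand_to_num_alt (hand : String) : Int :=
  (hand.toList.reverse.foldl
      (fun (st : Int × Int) c => (st.1 + handValB c * st.2, st.2 * 15)) (0, 1)).1

-- ===== PRECONDITION & SPEC =====
-- Pre_ excludes exactly the hands containing a character that is neither a face
-- card nor a digit: on those Python A raises ValueError (int(val)) and B raises too.
def Pre_hand_to_num (hand : String) : Prop :=
  (hand.toList.all (fun c => c ∈ ['A','K','Q','J','T','0','1','2','3','4','5','6','7','8','9'])) = true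
instance (hand : String) : Decidable (Pre_hand_to_num hand) := by unfold Pre_hand_to_num; infer_instance

def pvWitness_hand_to_num : String := "A23T"

def Spec_hand_to_num (hand : String) (out : Int) : Prop := out = hand_to_num_alt hand
instance (hand : String) (out : Int) : Decidable (Spec_hand_to_num hand out) := by unfold Spec_hand_to_num; infer_instance

-- ===== CLAIM (what is proved, stated in full; the proofs are below) =====
def Claim_equal_hand_to_num : Prop := ∀ (hand : String), Dom_hand_to_num hand → Pre_hand_to_num hand → Spec_hand_to_num hand (hand_to_num hand)

-- ===== LEMMAS AND PROOFS =====

-- the positional value of a list read with the HEAD as least significant digit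
def posVal : List Char → Int
  | [] => 0
  | c :: r => handValB c + 15 * posVal r

-- the positional value of a list read with the head as MOST significant digit
def msVal : List Char → Int
  | [] => 0
  | c :: l => handValB c * 15 ^ l.length + msVal l

lemma handStepA_eq (t : Int) (c : Char) : handStepA t c = t * 15 + handValB c := by
  by_cases hA : c = 'A' <;> by_cases hK : c = 'K' <;> by_cases hQ : c = 'Q' <;>
    by_cases hJ : c = 'J' <;> by_cases hT : c = 'T' <;>
  simp_all [handStepA, handValB, handValuesB, PySem.Dict.ofList,
    PySem.Dict.update, PySem.Dict.get?_insert]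

lemma foldlA_eq (l : List Char) : ∀ t : Int,
    l.foldl handStepA t = t * 15 ^ l.length + msVal l := by
  induction l with
  | nil => intro t; simp [msVal]
  | cons c l ih =>
    intro t
    simp only [List.foldl_cons, ih, handStepA_eq, msVal, List.length_cons]
    ring

lemma foldlB_eq (r : List Char) : ∀ t w : Int,
    r.foldl (fun (st : Int × Int) c => (st.1 + handValB c * st.2, st.2 * 15)) (t, w)
      = (t + w * posVal r, w * 15 ^ r.length) := by
  induction r with
  | nil => intro t w; simp [posVal]
  | cons c r ih =>
    intro t w
    simp only [List.foldl_cons, ih, posVal, List.length_cons, Prod.mk.injEq]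
    constructor <;> ring

lemma posVal_append (xs ys : List Char) :
    posVal (xs ++ ys) = posVal xs + 15 ^ xs.length * posVal ys := by
  induction xs with
  | nil => simp [posVal]
  | cons c xs ih => simp only [List.cons_append, posVal, ih, List.length_cons]; ring

lemma posVal_reverse (l : List Char) : posVal l.reverse = msVal l := by
  induction l with
  | nil => rfl
  | cons c l ih =>
    simp only [List.reverse_cons, posVal_append, ih, msVal, posVal,
      List.length_reverse]
    ring

-- ===== VERDICT (by name: the statement is the Claim_ definition above) =====
theorem hand_to_num_spec : Claim_equal_hand_to_num := by
  intro hand _ _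
  show hand_to_num hand = hand_to_num_alt hand
  unfold hand_to_num hand_to_num_alt
  rw [foldlA_eq, foldlB_eq]
  show 0 * 15 ^ hand.toList.length + msVal hand.toList
      = 0 + 1 * posVal hand.toList.reverse
  rw [posVal_reverse]; ring
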